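-- pv_equiv track=rewrite | github.com/dtg57/project-euler | unsolved/345 - Matrix sum.py | reducecolumns
-- ===== SOURCE A (Python) =====
-- def rowtocolumn(matrix):
--     end = []
--     for a in range(len(matrix)):
--         end.append([])
--         for b in range(len(matrix)):
--             end[-1].append(matrix[b][a])
--     return end
--
-- def reducecolumns(matrix):
--     columns = rowtocolumn(matrix)
--     end = []
--     for i in columns:
--         end.append([])
--         m = min(i)
--         for n in i:
--             end[-1].append(n - m)
--     return rowtocolumn(end)
-- ===== SOURCE B (Python) =====
-- def reducecolumns(matrix):
--     n = len(matrix)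
--     mins = [min(matrix[b][c] for b in range(n)) for c in range(n)]
--     return [[matrix[r][c] - mins[c] for c in range(n)] for r in range(n)]
-- ===== Notes on version B (the rewrite author's own statement) =====
-- stated objective: simpler
-- what changed: Replaces A's transpose->subtract->transpose pipeline (two explicit double loops plus a transpose helper called twice) with a single column-minima table followed by one direct subtraction pass, with no transpose helper at all.
import Mathlib
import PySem

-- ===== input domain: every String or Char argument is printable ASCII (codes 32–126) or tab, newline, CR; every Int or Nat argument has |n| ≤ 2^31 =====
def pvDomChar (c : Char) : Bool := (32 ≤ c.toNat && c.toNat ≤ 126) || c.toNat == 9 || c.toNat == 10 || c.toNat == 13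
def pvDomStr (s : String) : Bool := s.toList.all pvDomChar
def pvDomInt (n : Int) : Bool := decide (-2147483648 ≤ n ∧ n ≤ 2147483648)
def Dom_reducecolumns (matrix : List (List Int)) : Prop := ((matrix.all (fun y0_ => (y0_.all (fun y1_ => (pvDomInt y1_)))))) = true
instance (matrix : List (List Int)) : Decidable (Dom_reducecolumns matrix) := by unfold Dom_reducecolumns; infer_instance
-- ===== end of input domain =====

-- B replaces A's transpose→subtract→transpose pipeline by a column-minima table plus one
-- direct subtraction pass (simpler decomposition, same values and the same O(n^2) cost).

-- ===== PORT A =====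
-- indexing matrix[b][a] is in range on every input admitted by Pre_ (square-enough matrix),
-- where Python indexing agrees with getD; min(i) is called only on nonempty columns there.
def rowtocolumnA (matrix : List (List Int)) : List (List Int) :=
  (List.range matrix.length).map (fun a =>
    (List.range matrix.length).map (fun b => (matrix.getD b []).getD a 0))

def reducecolumns (matrix : List (List Int)) : List (List Int) :=
  let columns := rowtocolumnA matrix
  let end_ := columns.map (fun i =>
    let m := (PySem.List.min? i (fun x => x)).getD 0
    i.map (fun n => n - m))
  rowtocolumnA end_

-- ===== PORT B =====
def reducecolumns_alt (matrix : List (List Int)) : List (List Int) :=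
  let n := matrix.length
  let mins := (List.range n).map (fun c =>
    (PySem.List.min? ((List.range n).map (fun b => (matrix.getD b []).getD c 0)) (fun x => x)).getD 0)
  (List.range n).map (fun r =>
    (List.range n).map (fun c => (matrix.getD r []).getD c 0 - mins.getD c 0))

-- ===== PRECONDITION & SPEC =====
-- Pre_ excludes exactly the inputs where Python A raises IndexError: a row shorter than
-- the number of rows (matrix[b][a] out of range).
def Pre_reducecolumns (matrix : List (List Int)) : Prop :=
  ∀ row ∈ matrix, matrix.length ≤ row.length
instance (matrix : List (List Int)) : Decidable (Pre_reducecolumns matrix) := by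
  unfold Pre_reducecolumns; infer_instance

def pvWitness_reducecolumns : List (List Int) := [[3, 1], [2, 5]]

def Spec_reducecolumns (matrix : List (List Int)) (out : List (List Int)) : Prop := out = reducecolumns_alt matrix
instance (matrix : List (List Int)) (out : List (List Int)) : Decidable (Spec_reducecolumns matrix out) := by unfold Spec_reducecolumns; infer_instance

-- ===== CLAIM (what is proved, stated in full; the proofs are below) =====
def Claim_equal_reducecolumns : Prop := ∀ (matrix : List (List Int)), Dom_reducecolumns matrix → Pre_reducecolumns matrix → Spec_reducecolumns matrix (reducecolumns matrix)

-- ===== LEMMAS AND PROOFS =====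

theorem reducecolumns_eq_alt (matrix : List (List Int)) :
    reducecolumns matrix = reducecolumns_alt matrix := by
  unfold reducecolumns reducecolumns_alt rowtocolumnA
  simp only [List.length_map, List.length_range]
  apply List.map_congr_left
  intro a ha
  apply List.map_congr_left
  intro b hb
  rw [List.mem_range] at ha hb
  simp [List.getD_eq_getElem?_getD, ha, hb]

-- ===== VERDICT (by name: the statement is the Claim_ definition above) =====
theorem reducecolumns_spec : Claim_equal_reducecolumns := by
  intro matrix _ _
  exact reducecolumns_eq_alt matrix
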